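-- pv_equiv track=rewrite | github.com/HarivaradhanKM/Python_Coding | IDP - Answers/IDP 3  Medium 1.py | get_new_powerstatus
-- ===== SOURCE A (Python) =====
-- def get_new_powerstatus(customers, powerstatus, n):
--     max_customers_served = 0
--     num_of_hours = len(powerstatus)
--     new_powerstatus = []
--
--     for index in range(num_of_hours - n + 1):
--         backup_used = [1]*n
--         current_powerstatus = powerstatus[:index] + backup_used + powerstatus[index + n:]
--
--         served_customers = 0
--         for each_hour in range(num_of_hours):
--             if current_powerstatus[each_hour] == 1:
--                 served_customers += customers[each_hour]
--
--         if served_customers > max_customers_served: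
--             max_customers_served = served_customers
--             new_powerstatus = current_powerstatus
--
--     return new_powerstatus
-- ===== SOURCE B (Python) =====
-- def get_new_powerstatus(customers, powerstatus, n):
--     H = len(powerstatus)
--     if n > H:
--         return []
--     # one pass: base = customers already served; pre = prefix sums of the extra
--     # customers gained by forcing each hour on
--     base = 0
--     pre = [0]
--     for i in range(H):
--         if powerstatus[i] == 1:
--             base += customers[i]
--         pre.append(pre[-1] + (customers[i] if powerstatus[i] != 1 else 0))
--     # slide the window: gain of window starting at i is pre[i+n] - pre[i]
--     best_i = 0
--     best = pre[n] - pre[0]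
--     for i in range(1, H - n + 1):
--         s = pre[i + n] - pre[i]
--         if s > best:
--             best_i, best = i, s
--     if base + best <= 0:
--         return []
--     return powerstatus[:best_i] + [1] * n + powerstatus[best_i + n:]
-- ===== Notes on version B (the rewrite author's own statement) =====
-- stated objective: faster
-- what changed: Instead of rebuilding each candidate schedule and rescanning all H hours per window (O((H-n+1)*H)), B makes one pass computing the already-served base and prefix sums of the gain from forcing each hour on, evaluates every window in O(1), and builds the output list once for the best window.
-- outside the precondition, e.g. on get_new_powerstatus([], [0], 0): A returns [], B raises IndexError; on get_new_powerstatus([5], [1], -1): A returns [1], B raises IndexError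
import Mathlib
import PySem

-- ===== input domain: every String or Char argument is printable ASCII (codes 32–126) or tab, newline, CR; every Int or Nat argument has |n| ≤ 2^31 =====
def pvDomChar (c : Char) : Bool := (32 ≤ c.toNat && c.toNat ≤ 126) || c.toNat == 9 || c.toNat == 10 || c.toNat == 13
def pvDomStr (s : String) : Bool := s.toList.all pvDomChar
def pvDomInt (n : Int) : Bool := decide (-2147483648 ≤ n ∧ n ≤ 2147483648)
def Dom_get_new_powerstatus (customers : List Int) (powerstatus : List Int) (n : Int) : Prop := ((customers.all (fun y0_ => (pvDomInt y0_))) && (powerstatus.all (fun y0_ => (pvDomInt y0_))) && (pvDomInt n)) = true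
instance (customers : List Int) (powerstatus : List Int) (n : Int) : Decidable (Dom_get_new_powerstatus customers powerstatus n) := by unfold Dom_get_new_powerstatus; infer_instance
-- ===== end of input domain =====

-- B replaces A's per-window rebuild-and-rescan (O((H-n+1)*H)) by one prefix-sum pass
-- and an O(1)-per-window slide (O(H)); equal return values are proved on Pre_ below.

-- ===== PORT A =====
def get_new_powerstatus (customers : List Int) (powerstatus : List Int) (n : Int) : List Int :=
  let num_of_hours : Int := (powerstatus.length : Int)
  (((PySem.List.pyRange 0 (num_of_hours - n + 1) 1).foldl
    (fun (st : Int × List Int) index =>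
      let backup_used : List Int := List.replicate n.toNat 1
      let current := PySem.List.slice powerstatus none (some index) ++ backup_used ++
                     PySem.List.slice powerstatus (some (index + n)) none
      let served := (PySem.List.pyRange 0 num_of_hours 1).foldl
        (fun served each_hour =>
          if PySem.List.pyGetD current each_hour 0 = 1
          then served + PySem.List.pyGetD customers each_hour 0 else served) 0
      if served > st.1 then (served, current) else st)
    (0, [])).2)

-- ===== PORT B =====
def get_new_powerstatus_alt (customers : List Int) (powerstatus : List Int) (n : Int) : List Int :=
  let H : Int := (powerstatus.length : Int)
  if n > H then []
  else
    -- one pass: base of already-served customers, and prefix sums `pre` of the gains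
    let bp := (PySem.List.pyRange 0 H 1).foldl
      (fun (st : Int × List Int) i =>
        let base := if PySem.List.pyGetD powerstatus i 0 = 1
                    then st.1 + PySem.List.pyGetD customers i 0 else st.1
        (base, st.2 ++ [PySem.List.pyGetD st.2 (-1) 0 +
          (if ¬ PySem.List.pyGetD powerstatus i 0 = 1
           then PySem.List.pyGetD customers i 0 else 0)]))
      (0, [0])
    let pre := bp.2
    -- slide the window: gain of the window starting at i is pre[i+n] - pre[i]
    let ib := (PySem.List.pyRange 1 (H - n + 1) 1).foldl
      (fun (st : Int × Int) i =>
        let s := PySem.List.pyGetD pre (i + n) 0 - PySem.List.pyGetD pre i 0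
        if s > st.2 then (i, s) else st)
      (0, PySem.List.pyGetD pre n 0 - PySem.List.pyGetD pre 0 0)
    if bp.1 + ib.2 ≤ 0 then []
    else PySem.List.slice powerstatus none (some ib.1) ++ List.replicate n.toNat 1 ++
         PySem.List.slice powerstatus (some (ib.1 + n)) none

-- ===== PRECONDITION & SPEC =====
-- Pre_ excludes negative n (outside the task's natural domain: A's overlapping-slice
-- schedules there are an accident of slicing, and A raises IndexError on most of them)
-- and customers lists shorter than powerstatus (Python A raises IndexError there unless
-- every out-of-range hour happens to stay off).
def Pre_get_new_powerstatus (customers : List Int) (powerstatus : List Int) (n : Int) : Prop :=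
  0 ≤ n ∧ (n ≤ (powerstatus.length : Int) → powerstatus.length ≤ customers.length)
instance (customers : List Int) (powerstatus : List Int) (n : Int) : Decidable (Pre_get_new_powerstatus customers powerstatus n) := by unfold Pre_get_new_powerstatus; infer_instance
def pvWitness_get_new_powerstatus : List Int × List Int × Int := ([3, 1, 2], [1, 0, 0], 2)

def Spec_get_new_powerstatus (customers : List Int) (powerstatus : List Int) (n : Int) (out : List Int) : Prop := out = get_new_powerstatus_alt customers powerstatus n
instance (customers : List Int) (powerstatus : List Int) (n : Int) (out : List Int) : Decidable (Spec_get_new_powerstatus customers powerstatus n out) := by unfold Spec_get_new_powerstatus; infer_instance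

-- ===== CLAIM (what is proved, stated in full; the proofs are below) =====
def Claim_equal_get_new_powerstatus : Prop := ∀ (customers : List Int) (powerstatus : List Int) (n : Int), Dom_get_new_powerstatus customers powerstatus n → Pre_get_new_powerstatus customers powerstatus n → Spec_get_new_powerstatus customers powerstatus n (get_new_powerstatus customers powerstatus n)

-- ===== LEMMAS AND PROOFS =====

def pvGain (cs ps : List Int) (h : Nat) : Int := if ps.getD h 0 = 1 then 0 else cs.getD h 0
def pvP (cs ps : List Int) (k : Nat) : Int := ((List.range k).map (pvGain cs ps)).sum
def pvBaseK (cs ps : List Int) (k : Nat) : Int :=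
  ((List.range k).map (fun h => if ps.getD h 0 = 1 then cs.getD h 0 else 0)).sum
def pvOff (cs ps : List Int) (m i : Nat) : Int := pvP cs ps (i + m) - pvP cs ps i
def pvWin (ps : List Int) (m i : Nat) : List Int :=
  ps.take i ++ List.replicate m 1 ++ ps.drop (i + m)

lemma pvFoldIf (Q : Nat → Prop) [DecidablePred Q] (C : Nat → Int) (l : List Nat) (a : Int) :
    l.foldl (fun s h => if Q h then s + C h else s) a
      = a + (l.map (fun h => if Q h then C h else 0)).sum := by
  induction l generalizing a with
  | nil => simp
  | cons x xs ih => simp only [List.foldl_cons, List.map_cons, List.sum_cons, ih]; split_ifs <;> ring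

def pvP' (g : Nat → Int) (j : Nat) : Int := ((List.range j).map g).sum

lemma pvSumLt (g : Nat → Int) (j r : Nat) :
    ((List.range (j + r)).map (fun h => if h < j then g h else 0)).sum = pvP' g j := by
  induction r with
  | zero =>
    simp only [Nat.add_zero, pvP']
    exact congrArg _ (List.map_congr_left (fun x hx => by
      simp only [List.mem_range] at hx; simp [hx]))
  | succ r ih =>
    rw [show j + (r+1) = (j+r)+1 from rfl, List.range_succ]
    simp [ih]

lemma pvWin_getD (ps : List Int) (m k h : Nat) (hk : k + m ≤ ps.length) :
    (pvWin ps m k).getD h 0 = if h < k then ps.getD h 0 else if h < k + m then 1 else ps.getD h 0 := by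
  have hkl : (ps.take k).length = k := by simp; omega
  rw [List.getD_eq_getElem?_getD, List.getD_eq_getElem?_getD, pvWin]
  by_cases h1 : h < k
  · rw [List.getElem?_append_left (by simp [hkl]; omega),
        List.getElem?_append_left (by omega)]
    simp [h1]
  · by_cases h2 : h < k + m
    · rw [List.getElem?_append_left (by simp [hkl]; omega),
          List.getElem?_append_right (by omega)]
      simp only [hkl, List.getElem?_replicate]
      rw [if_pos (by omega)]
      simp [h1, h2]
    · rw [List.getElem?_append_right (by simp [hkl]; omega)]
      simp only [List.length_append, hkl, List.length_replicate, List.getElem?_drop]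
      rw [show k + m + (h - (k + m)) = h by omega]
      simp [h1, h2]

lemma pvServed (cs ps : List Int) (m k : Nat) (hk : k + m ≤ ps.length) :
    ((List.range ps.length).map (fun h => if (pvWin ps m k).getD h 0 = 1 then cs.getD h 0 else 0)).sum
      = pvBaseK cs ps ps.length + pvOff cs ps m k := by
  have key : ((List.range ps.length).map (fun h =>
      (if (pvWin ps m k).getD h 0 = 1 then cs.getD h 0 else 0) + (if h < k then pvGain cs ps h else 0))).sum
      = ((List.range ps.length).map (fun h =>
      (if ps.getD h 0 = 1 then cs.getD h 0 else 0) + (if h < k + m then pvGain cs ps h else 0))).sum := by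
    refine congrArg _ (List.map_congr_left (fun h hh => ?_))
    simp only [List.mem_range] at hh
    rw [pvWin_getD ps m k h hk]
    by_cases h1 : h < k
    · simp [h1, show h < k + m by omega]
    · by_cases h2 : h < k + m
      · simp only [if_pos h2, if_neg h1]
        unfold pvGain
        split_ifs <;> ring
      · simp [h1, h2]
  rw [PySem.List.sum_map_add_int, PySem.List.sum_map_add_int] at key
  have e1 : ((List.range ps.length).map (fun h => if h < k then pvGain cs ps h else 0)).sum
      = pvP cs ps k := by
    have := pvSumLt (pvGain cs ps) k (ps.length - k)
    rw [show k + (ps.length - k) = ps.length by omega] at this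
    exact this
  have e2 : ((List.range ps.length).map (fun h => if h < k + m then pvGain cs ps h else 0)).sum
      = pvP cs ps (k + m) := by
    have := pvSumLt (pvGain cs ps) (k + m) (ps.length - (k + m))
    rw [show (k + m) + (ps.length - (k + m)) = ps.length by omega] at this
    exact this
  rw [e1, e2] at key
  unfold pvOff pvBaseK
  omega

lemma pv_foldl_rel {α β γ : Type} (R : α → β → Prop) (f : α → γ → α) (g : β → γ → β)
    (l : List γ) (a : α) (b : β) (hab : R a b)
    (hstep : ∀ a b x, x ∈ l → R a b → R (f a x) (g b x)) :
    R (l.foldl f a) (l.foldl g b) := by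
  induction l generalizing a b with
  | nil => exact hab
  | cons x xs ih =>
    exact ih _ _ (hstep a b x List.mem_cons_self hab)
      (fun a b y hy => hstep a b y (List.mem_cons_of_mem _ hy))

-- B's first loop produces the base and the prefix-sum list
lemma pvB1 (cs ps : List Int) (k : Nat) :
    (List.range k).foldl
      (fun (st : Int × List Int) (j : Nat) =>
        ((if PySem.List.pyGetD ps (j : Int) 0 = 1 then st.1 + PySem.List.pyGetD cs (j : Int) 0 else st.1),
         st.2 ++ [PySem.List.pyGetD st.2 (-1) 0 +
           (if ¬ PySem.List.pyGetD ps (j : Int) 0 = 1 then PySem.List.pyGetD cs (j : Int) 0 else 0)]))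
      (0, [0])
      = (pvBaseK cs ps k, (List.range (k + 1)).map (pvP cs ps)) := by
  induction k with
  | zero => simp [pvBaseK, pvP]
  | succ k ih =>
    rw [List.range_succ, List.foldl_append, ih]
    have hlast : (List.range (k + 1)).map (pvP cs ps)
        = (List.range k).map (pvP cs ps) ++ [pvP cs ps k] := by
      rw [List.range_succ, List.map_append]; rfl
    simp only [List.foldl_cons, List.foldl_nil, hlast,
      PySem.List.pyGetD_neg_one_append_singleton, PySem.List.pyGetD_natCast,
      Prod.mk.injEq]
    refine ⟨?_, ?_⟩
    · simp only [pvBaseK, List.range_succ, List.map_append, List.sum_append,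
        List.map_cons, List.map_nil, List.sum_cons, List.sum_nil]
      split_ifs <;> ring
    · have hps : pvP cs ps (k + 1) = pvP cs ps k +
          (if ¬ ps.getD k 0 = 1 then cs.getD k 0 else 0) := by
        simp only [pvP, List.range_succ, List.map_append, List.sum_append,
          List.map_cons, List.map_nil, List.sum_cons, List.sum_nil, pvGain]
        split_ifs <;> ring
      rw [show (List.range (k + 1 + 1)).map (pvP cs ps)
          = (List.range (k + 1)).map (pvP cs ps) ++ [pvP cs ps (k + 1)] by
          rw [List.range_succ, List.map_append]; rfl, hps, hlast, List.append_assoc]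

def pvStepB (cs ps : List Int) (m : Nat) (st : Nat × Int) (i : Nat) : Nat × Int :=
  if pvOff cs ps m i > st.2 then (i, pvOff cs ps m i) else st
def pvRun (cs ps : List Int) (m k : Nat) : Nat × Int :=
  ((List.range k).map Nat.succ).foldl (pvStepB cs ps m) (0, pvOff cs ps m 0)
def pvCanon (cs ps : List Int) (m : Nat) : List Int :=
  (if pvBaseK cs ps ps.length + (pvRun cs ps m (ps.length - m)).2 > 0
   then (pvBaseK cs ps ps.length + (pvRun cs ps m (ps.length - m)).2,
         pvWin ps m (pvRun cs ps m (ps.length - m)).1)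
   else ((0 : Int), ([] : List Int))).2

lemma pvRangeCast (a : Nat) : PySem.List.pyRange 0 (a : Int) 1 = (List.range a).map (fun k : Nat => (k : Int)) := by
  rw [PySem.List.pyRange_one]
  have : ((a : Int) - 0).toNat = a := by omega
  rw [this]
  exact List.map_congr_left (fun x _ => by ring)

lemma pvAB (cs ps : List Int) (m : Nat) (l : List Nat) (w : Nat × Int) :
    l.foldl (fun (st : Int × List Int) k =>
        if pvBaseK cs ps ps.length + pvOff cs ps m k > st.1
        then (pvBaseK cs ps ps.length + pvOff cs ps m k, pvWin ps m k) else st)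
      (if pvBaseK cs ps ps.length + w.2 > 0
       then (pvBaseK cs ps ps.length + w.2, pvWin ps m w.1) else (0, []))
    = (if pvBaseK cs ps ps.length + (l.foldl (pvStepB cs ps m) w).2 > 0
       then (pvBaseK cs ps ps.length + (l.foldl (pvStepB cs ps m) w).2,
             pvWin ps m (l.foldl (pvStepB cs ps m) w).1) else (0, [])) := by
  induction l generalizing w with
  | nil => rfl
  | cons x xs ih =>
    simp only [List.foldl_cons]
    rw [← ih]
    congr 1
    unfold pvStepB
    split_ifs <;> first | rfl | omega

lemma pvA (cs ps : List Int) (m : Nat) (hm : m ≤ ps.length) :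
    get_new_powerstatus cs ps (m : Int) = pvCanon cs ps m := by
  simp only [get_new_powerstatus]
  have hR : PySem.List.pyRange 0 ((ps.length : Int) - (m : Int) + 1) 1
      = (List.range (ps.length - m + 1)).map (fun k : Nat => (k : Int)) := by
    rw [show (ps.length : Int) - (m : Int) + 1 = ((ps.length - m + 1 : Nat) : Int) by omega]
    exact pvRangeCast _
  rw [hR, List.foldl_map]
  have hcongr : ∀ (st : Int × List Int) (k : Nat), k ∈ List.range (ps.length - m + 1) →
      (if (PySem.List.pyRange 0 (ps.length : Int) 1).foldl
            (fun served each_hour =>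
              if PySem.List.pyGetD (PySem.List.slice ps none (some (k : Int)) ++
                    List.replicate ((m : Int)).toNat 1 ++
                    PySem.List.slice ps (some ((k : Int) + (m : Int))) none) each_hour 0 = 1
              then served + PySem.List.pyGetD cs each_hour 0 else served) 0 > st.1
       then ((PySem.List.pyRange 0 (ps.length : Int) 1).foldl
            (fun served each_hour =>
              if PySem.List.pyGetD (PySem.List.slice ps none (some (k : Int)) ++
                    List.replicate ((m : Int)).toNat 1 ++
                    PySem.List.slice ps (some ((k : Int) + (m : Int))) none) each_hour 0 = 1
              then served + PySem.List.pyGetD cs each_hour 0 else served) 0,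
             PySem.List.slice ps none (some (k : Int)) ++
                    List.replicate ((m : Int)).toNat 1 ++
                    PySem.List.slice ps (some ((k : Int) + (m : Int))) none)
       else st)
      = (if pvBaseK cs ps ps.length + pvOff cs ps m k > st.1
         then (pvBaseK cs ps ps.length + pvOff cs ps m k, pvWin ps m k) else st) := by
    intro st k hk
    simp only [List.mem_range] at hk
    have hkm : k + m ≤ ps.length := by omega
    have hcur : PySem.List.slice ps none (some (k : Int)) ++ List.replicate ((m : Int)).toNat 1 ++
        PySem.List.slice ps (some ((k : Int) + (m : Int))) none = pvWin ps m k := by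
      rw [PySem.List.slice_to_natCast, Int.toNat_natCast,
        show (k : Int) + (m : Int) = ((k + m : Nat) : Int) by push_cast; ring,
        PySem.List.slice_from_natCast, pvWin]
    rw [hcur]
    have hserv : (PySem.List.pyRange 0 (ps.length : Int) 1).foldl
        (fun served each_hour =>
          if PySem.List.pyGetD (pvWin ps m k) each_hour 0 = 1
          then served + PySem.List.pyGetD cs each_hour 0 else served) 0
        = pvBaseK cs ps ps.length + pvOff cs ps m k := by
      rw [pvRangeCast, List.foldl_map]
      simp only [PySem.List.pyGetD_natCast]
      rw [pvFoldIf (fun h => (pvWin ps m k).getD h 0 = 1) (fun h => cs.getD h 0)]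
      rw [show (fun h => if (pvWin ps m k).getD h 0 = 1 then cs.getD h 0 else 0)
          = (fun h => if (pvWin ps m k).getD h 0 = 1 then cs.getD h 0 else (0:Int)) from rfl]
      rw [pvServed cs ps m k hkm]
      ring
    rw [hserv]
  rw [PySem.List.foldl_congr_mem _ _ _ _ (fun st k hk => hcongr st k hk)]
  rw [List.range_succ_eq_map, List.foldl_cons]
  exact congrArg Prod.snd (pvAB cs ps m ((List.range (ps.length - m)).map Nat.succ) (0, pvOff cs ps m 0))

lemma pvB (cs ps : List Int) (m : Nat) (hm : m ≤ ps.length) :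
    get_new_powerstatus_alt cs ps (m : Int) = pvCanon cs ps m := by
  simp only [get_new_powerstatus_alt]
  rw [if_neg (by omega : ¬ ((m : Int) > (ps.length : Int)))]
  rw [pvRangeCast, List.foldl_map, pvB1]
  simp only []
  have hlist : PySem.List.pyRange 1 ((ps.length : Int) - (m : Int) + 1) 1
      = ((List.range (ps.length - m)).map Nat.succ).map (fun k : Nat => (k : Int)) := by
    rw [PySem.List.pyRange_one, List.map_map]
    have h1 : ((ps.length : Int) - (m : Int) + 1 - 1).toNat = ps.length - m := by omega
    rw [h1]
    exact List.map_congr_left (fun x _ => by simp [Nat.succ_eq_add_one]; ring)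
  rw [hlist, List.foldl_map]
  have hpre0 : PySem.List.pyGetD ((List.range (ps.length + 1)).map (pvP cs ps)) 0 0 = 0 := by
    rw [show (0 : Int) = ((0 : Nat) : Int) from rfl, PySem.List.pyGetD_natCast,
      PySem.List.getD_map_range _ _ _ _ (by omega)]
    simp [pvP]
  have hprem : PySem.List.pyGetD ((List.range (ps.length + 1)).map (pvP cs ps)) ((m : Int)) 0
      = pvP cs ps m := by
    rw [PySem.List.pyGetD_natCast, PySem.List.getD_map_range _ _ _ _ (by omega)]
  have hrel : ((List.range (ps.length - m)).map Nat.succ).foldl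
      (fun (st : Int × Int) (x : Nat) =>
        if PySem.List.pyGetD ((List.range (ps.length + 1)).map (pvP cs ps)) ((x : Int) + (m : Int)) 0 -
             PySem.List.pyGetD ((List.range (ps.length + 1)).map (pvP cs ps)) ((x : Int)) 0 > st.2
        then (((x : Int)), PySem.List.pyGetD ((List.range (ps.length + 1)).map (pvP cs ps)) ((x : Int) + (m : Int)) 0 -
             PySem.List.pyGetD ((List.range (ps.length + 1)).map (pvP cs ps)) ((x : Int)) 0)
        else st)
      (0, pvP cs ps m - 0)
      = (((pvRun cs ps m (ps.length - m)).1 : Int), (pvRun cs ps m (ps.length - m)).2) := by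
    unfold pvRun
    apply pv_foldl_rel (R := fun (a : Int × Int) (b : Nat × Int) => a = ((b.1 : Int), b.2))
    · simp [pvOff, pvP]
    · intro a b x hx hab
      subst hab
      simp only [List.mem_map, List.mem_range] at hx
      obtain ⟨k, hk, rfl⟩ := hx
      have hxm : k.succ + m ≤ ps.length := by omega
      have e1 : PySem.List.pyGetD ((List.range (ps.length + 1)).map (pvP cs ps)) (((k.succ : Nat) : Int) + (m : Int)) 0
          = pvP cs ps (k.succ + m) := by
        rw [show ((k.succ : Nat) : Int) + (m : Int) = ((k.succ + m : Nat) : Int) by push_cast; ring,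
          PySem.List.pyGetD_natCast, PySem.List.getD_map_range _ _ _ _ (by omega)]
      have e2 : PySem.List.pyGetD ((List.range (ps.length + 1)).map (pvP cs ps)) (((k.succ : Nat) : Int)) 0
          = pvP cs ps k.succ := by
        rw [PySem.List.pyGetD_natCast, PySem.List.getD_map_range _ _ _ _ (by omega)]
      rw [e1, e2]
      unfold pvStepB pvOff
      split_ifs <;> simp_all
  rw [hprem, hpre0, hrel]
  have hcur : PySem.List.slice ps none (some ((pvRun cs ps m (ps.length - m)).1 : Int)) ++
      List.replicate ((m : Int)).toNat 1 ++
      PySem.List.slice ps (some (((pvRun cs ps m (ps.length - m)).1 : Int) + (m : Int))) none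
      = pvWin ps m (pvRun cs ps m (ps.length - m)).1 := by
    rw [PySem.List.slice_to_natCast, Int.toNat_natCast,
      show ((pvRun cs ps m (ps.length - m)).1 : Int) + (m : Int)
        = (((pvRun cs ps m (ps.length - m)).1 + m : Nat) : Int) by push_cast; ring,
      PySem.List.slice_from_natCast, pvWin]
  rw [hcur]
  unfold pvCanon
  split_ifs <;> first | rfl | omega

-- ===== VERDICT (by name: the statement is the Claim_ definition above) =====
theorem get_new_powerstatus_spec : Claim_equal_get_new_powerstatus := by
  intro customers powerstatus n hdom hpre
  unfold Spec_get_new_powerstatus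
  obtain ⟨hn, -⟩ := hpre
  by_cases hbig : n > (powerstatus.length : Int)
  · have hA : get_new_powerstatus customers powerstatus n = [] := by
      simp only [get_new_powerstatus]
      rw [PySem.List.pyRange_one_eq_nil
        (show (powerstatus.length : Int) - n + 1 ≤ 0 by omega)]
      rfl
    have hB : get_new_powerstatus_alt customers powerstatus n = [] := by
      simp only [get_new_powerstatus_alt]
      rw [if_pos hbig]
    rw [hA, hB]
  · have hmn : n = ((n.toNat : Nat) : Int) := by omega
    rw [hmn, pvA customers powerstatus n.toNat (by omega)]
    exact (pvB customers powerstatus n.toNat (by omega)).symm
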